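-- pv_equiv track=rewrite | github.com/pypi-data/pypi-mirror-374 | packages/pixel-planner/pixel_planner-0.2.1-py3-none-any.whl/pixel_planner/cli.py | replace_timeline_section
-- ===== SOURCE A (Python) =====
-- def replace_timeline_section(md: str, vb_block_content: str) -> str:
--     lines = md.splitlines()
--     n = len(lines)
--     # Locate the timeline heading
--     heading_idx = None
--     for idx, line in enumerate(lines):
--         if line.strip().lower().startswith("## project timeline"):
--             heading_idx = idx
--             break
--     if heading_idx is None:
--         # If not found, append at end
--         new_block = [
--             "## Project Timeline (Phases)",
--             "",
--             "```text",
--             *vb_block_content.splitlines(),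
--             "```",
--         ]
--         return (md.rstrip() + "\n\n" + "\n".join(new_block) + "\n")
--
--     # Find the end of existing timeline section: prefer closing code fence, otherwise next heading or EOF
--     i = heading_idx + 1
--     # Skip blank lines
--     while i < n and lines[i].strip() == "":
--         i += 1
--     # If next is an opening fence, skip until matching closing fence
--     if i < n and lines[i].strip().startswith("```"):
--         i += 1
--         while i < n and not lines[i].strip().startswith("```"):
--             i += 1
--         if i < n and lines[i].strip().startswith("```"):
--             i += 1  # include closing fence
--     else:
--         # No fence; skip until next heading or EOF
--         while i < n and not lines[i].strip().startswith("## "):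
--             i += 1
--
--     # Build new content
--     before = lines[:heading_idx]
--     new_block = [
--         lines[heading_idx],
--         "",
--         "```text",
--         *vb_block_content.splitlines(),
--         "```",
--     ]
--     after = lines[i:]
--     return "\n".join(before + new_block + after).rstrip() + "\n"
-- ===== SOURCE B (Python) =====
-- def replace_timeline_section(md: str, vb_block_content: str) -> str:
--     # Single linear pass with an explicit state machine instead of index search + slicing.
--     tail_block = ["", "```text", *vb_block_content.splitlines(), "```"]
--     out = []
--     state = "before"  # before -> blanks -> (fence | prose) -> after
--     for line in md.splitlines():
--         s = line.strip()
--         if state == "before":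
--             out.append(line)
--             if s.lower().startswith("## project timeline"):
--                 out.extend(tail_block)
--                 state = "blanks"
--         elif state == "blanks":
--             if s == "":
--                 continue
--             elif s.startswith("```"):
--                 state = "fence"
--             elif s.startswith("## "):
--                 out.append(line)
--                 state = "after"
--             else:
--                 state = "prose"
--         elif state == "fence":
--             if s.startswith("```"):
--                 state = "after"
--         elif state == "prose":
--             if s.startswith("## "):
--                 out.append(line)
--                 state = "after"
--         else:  # after
--             out.append(line)
--     if state == "before":
--         return md.rstrip() + "\n\n" + "\n".join(["## Project Timeline (Phases)", *tail_block]) + "\n"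
--     return "\n".join(out).rstrip() + "\n"
-- ===== Notes on version B (the rewrite author's own statement) =====
-- stated objective: alternative
-- what changed: A locates the heading by index, advances an index through three separate while loops (blanks, fence, prose) and reassembles via slicing; B is a single linear pass over the lines with an explicit state machine (before/blanks/fence/prose/after) accumulating the output directly.
import Mathlib
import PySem

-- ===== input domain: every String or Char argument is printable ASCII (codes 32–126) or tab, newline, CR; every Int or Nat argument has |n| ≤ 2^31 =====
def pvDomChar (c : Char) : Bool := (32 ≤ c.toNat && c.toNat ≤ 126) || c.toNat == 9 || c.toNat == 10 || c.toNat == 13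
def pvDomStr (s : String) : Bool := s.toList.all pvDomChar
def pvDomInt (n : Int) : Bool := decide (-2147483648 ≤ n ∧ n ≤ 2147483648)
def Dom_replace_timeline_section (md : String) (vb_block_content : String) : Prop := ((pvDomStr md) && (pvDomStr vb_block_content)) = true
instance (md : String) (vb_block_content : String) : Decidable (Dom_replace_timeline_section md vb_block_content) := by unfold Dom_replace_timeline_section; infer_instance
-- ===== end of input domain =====

-- B replaces A's heading-index search, three index-advancing while loops and list slicing
-- by a single linear pass over the lines with an explicit state machine (objective: alternative decomposition).

-- ===== PORT A =====
-- line.strip().lower().startswith("## project timeline")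
def pvHeadTest (line : String) : Bool :=
  PySem.Str.startswith (PySem.Str.lower (PySem.Str.strip line)) "## project timeline"

-- the 'for idx, line in enumerate(lines): … break' search for heading_idx
def pvFindHeading : List String → Option Nat
  | [] => none
  | x :: xs => if pvHeadTest x then some 0 else (pvFindHeading xs).map (· + 1)

-- 'while i < n and lines[i].strip() == "": i += 1'  (lines[i] is in range under the guard, so getD is exact)
def pvSkipBlanks (lines : List String) (n i : Nat) : Nat :=
  if i < n ∧ PySem.Str.strip (lines.getD i "") = "" then pvSkipBlanks lines n (i + 1) else i
termination_by n - i
decreasing_by omega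

-- 'while i < n and not lines[i].strip().startswith("```"): i += 1'
def pvSkipFence (lines : List String) (n i : Nat) : Nat :=
  if i < n ∧ ¬ PySem.Str.startswith (PySem.Str.strip (lines.getD i "")) "```" then
    pvSkipFence lines n (i + 1)
  else i
termination_by n - i
decreasing_by omega

-- 'while i < n and not lines[i].strip().startswith("## "): i += 1'
def pvSkipProse (lines : List String) (n i : Nat) : Nat :=
  if i < n ∧ ¬ PySem.Str.startswith (PySem.Str.strip (lines.getD i "")) "## " then
    pvSkipProse lines n (i + 1)
  else i
termination_by n - i
decreasing_by omega

def replace_timeline_section (md : String) (vb_block_content : String) : String :=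
  let lines := PySem.Str.splitlines md
  let n := lines.length
  match pvFindHeading lines with
  | none =>
    let new_block := "## Project Timeline (Phases)" :: "" :: "```text" ::
      PySem.Str.splitlines vb_block_content ++ ["```"]
    PySem.Str.rstrip md ++ "\n\n" ++ PySem.Str.join "\n" new_block ++ "\n"
  | some heading_idx =>
    let i0 := pvSkipBlanks lines n (heading_idx + 1)
    let i :=
      if i0 < n ∧ PySem.Str.startswith (PySem.Str.strip (lines.getD i0 "")) "```" then
        let j := pvSkipFence lines n (i0 + 1)
        if j < n ∧ PySem.Str.startswith (PySem.Str.strip (lines.getD j "")) "```" then j + 1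
        else j
      else pvSkipProse lines n i0
    let before := lines.take heading_idx
    let new_block := lines.getD heading_idx "" :: "" :: "```text" ::
      PySem.Str.splitlines vb_block_content ++ ["```"]
    let after := lines.drop i
    PySem.Str.rstrip (PySem.Str.join "\n" (before ++ new_block ++ after)) ++ "\n"

-- ===== PORT B =====
inductive PvState | before | blanks | fence | prose | after
deriving DecidableEq, Repr

def pvStep (tail_block : List String) : (List String × PvState) → String → (List String × PvState)
  | (out, .before), line =>
    if PySem.Str.startswith (PySem.Str.lower (PySem.Str.strip line)) "## project timeline" then
      (out ++ [line] ++ tail_block, .blanks)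
    else (out ++ [line], .before)
  | (out, .blanks), line =>
    if PySem.Str.strip line = "" then (out, .blanks)
    else if PySem.Str.startswith (PySem.Str.strip line) "```" then (out, .fence)
    else if PySem.Str.startswith (PySem.Str.strip line) "## " then (out ++ [line], .after)
    else (out, .prose)
  | (out, .fence), line =>
    if PySem.Str.startswith (PySem.Str.strip line) "```" then (out, .after) else (out, .fence)
  | (out, .prose), line =>
    if PySem.Str.startswith (PySem.Str.strip line) "## " then (out ++ [line], .after) else (out, .prose)
  | (out, .after), line => (out ++ [line], .after)

def replace_timeline_section_alt (md : String) (vb_block_content : String) : String :=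
  let tail_block := "" :: "```text" :: PySem.Str.splitlines vb_block_content ++ ["```"]
  let r := (PySem.Str.splitlines md).foldl (pvStep tail_block) ([], .before)
  if r.2 = PvState.before then
    PySem.Str.rstrip md ++ "\n\n" ++
      PySem.Str.join "\n" ("## Project Timeline (Phases)" :: tail_block) ++ "\n"
  else
    PySem.Str.rstrip (PySem.Str.join "\n" r.1) ++ "\n"

-- ===== PRECONDITION & SPEC =====
def Spec_replace_timeline_section (md : String) (vb_block_content : String) (out : String) : Prop := out = replace_timeline_section_alt md vb_block_content
instance (md : String) (vb_block_content : String) (out : String) : Decidable (Spec_replace_timeline_section md vb_block_content out) := by unfold Spec_replace_timeline_section; infer_instance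

-- ===== CLAIM (what is proved, stated in full; the proofs are below) =====
def Claim_equal_replace_timeline_section : Prop := ∀ (md : String) (vb_block_content : String), Dom_replace_timeline_section md vb_block_content → Spec_replace_timeline_section md vb_block_content (replace_timeline_section md vb_block_content)

-- ===== LEMMAS AND PROOFS =====

-- list-structural versions of the section skipping, used only in the proofs
def pvFenceSec : List String → List String
  | [] => []
  | x :: xs => if PySem.Str.startswith (PySem.Str.strip x) "```" then xs else pvFenceSec xs

def pvProseSec : List String → List String
  | [] => []
  | x :: xs => if PySem.Str.startswith (PySem.Str.strip x) "## " then x :: xs else pvProseSec xs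

def pvDropB : List String → List String
  | [] => []
  | x :: xs => if PySem.Str.strip x = "" then pvDropB xs else x :: xs

def pvSkipSec : List String → List String
  | [] => []
  | x :: xs =>
    if PySem.Str.strip x = "" then pvSkipSec xs
    else if PySem.Str.startswith (PySem.Str.strip x) "```" then pvFenceSec xs
    else if PySem.Str.startswith (PySem.Str.strip x) "## " then x :: xs
    else pvProseSec xs

theorem pvSkipBlanks_drop (lines : List String) (i : Nat) :
    lines.drop (pvSkipBlanks lines lines.length i) = pvDropB (lines.drop i) := by
  fun_induction pvSkipBlanks lines lines.length i with
  | case1 i h ih =>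
    obtain ⟨hlt, hblank⟩ := h
    rw [ih, List.drop_eq_getElem_cons hlt, pvDropB]
    simp [List.getD_eq_getElem?_getD, List.getElem?_eq_getElem hlt] at hblank
    simp [hblank]
  | case2 i h =>
    by_cases hlt : i < lines.length
    · have hb : ¬ PySem.Str.strip (lines.getD i "") = "" := by tauto
      rw [List.drop_eq_getElem_cons hlt, pvDropB]
      simp [List.getD_eq_getElem?_getD, List.getElem?_eq_getElem hlt] at hb
      simp [hb, ← List.drop_eq_getElem_cons hlt]
    · rw [List.drop_eq_nil_of_le (by omega : lines.length ≤ i)]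
      simp [pvDropB]

theorem pvSkipFence_drop (lines : List String) (i : Nat) :
    lines.drop
      (if pvSkipFence lines lines.length i < lines.length ∧
          PySem.Str.startswith (PySem.Str.strip (lines.getD (pvSkipFence lines lines.length i) "")) "```"
       then pvSkipFence lines lines.length i + 1 else pvSkipFence lines lines.length i)
    = pvFenceSec (lines.drop i) := by
  fun_induction pvSkipFence lines lines.length i with
  | case1 i h ih =>
    obtain ⟨hlt, hnf⟩ := h
    rw [ih, List.drop_eq_getElem_cons hlt, pvFenceSec]
    simp [List.getD_eq_getElem?_getD, List.getElem?_eq_getElem hlt] at hnf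
    simp [hnf]
  | case2 i h =>
    by_cases hlt : i < lines.length
    · have hf : PySem.Str.startswith (PySem.Str.strip (lines.getD i "")) "```" := by tauto
      rw [if_pos ⟨hlt, hf⟩]
      rw [List.drop_eq_getElem_cons hlt, pvFenceSec]
      simp [List.getD_eq_getElem?_getD, List.getElem?_eq_getElem hlt] at hf
      simp [hf]
    · rw [if_neg (by tauto : ¬ (i < lines.length ∧ PySem.Str.startswith (PySem.Str.strip (lines.getD i "")) "```" = true))]
      rw [List.drop_eq_nil_of_le (by omega : lines.length ≤ i)]
      simp [pvFenceSec]

theorem pvSkipProse_drop (lines : List String) (i : Nat) :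
    lines.drop (pvSkipProse lines lines.length i) = pvProseSec (lines.drop i) := by
  fun_induction pvSkipProse lines lines.length i with
  | case1 i h ih =>
    obtain ⟨hlt, hnh⟩ := h
    rw [ih, List.drop_eq_getElem_cons hlt, pvProseSec]
    simp [List.getD_eq_getElem?_getD, List.getElem?_eq_getElem hlt] at hnh
    simp [hnh]
  | case2 i h =>
    by_cases hlt : i < lines.length
    · have hh : PySem.Str.startswith (PySem.Str.strip (lines.getD i "")) "## " := by tauto
      rw [List.drop_eq_getElem_cons hlt, pvProseSec]
      simp [List.getD_eq_getElem?_getD, List.getElem?_eq_getElem hlt] at hh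
      simp [hh, ← List.drop_eq_getElem_cons hlt]
    · rw [List.drop_eq_nil_of_le (by omega : lines.length ≤ i)]
      simp [pvProseSec]

theorem pvSkipSec_dropB (xs : List String) : pvSkipSec xs = pvSkipSec (pvDropB xs) := by
  induction xs with
  | nil => rfl
  | cons x xs ih =>
    by_cases hb : PySem.Str.strip x = ""
    · rw [pvSkipSec, pvDropB, if_pos hb, if_pos hb, ih]
    · rw [pvDropB, if_neg hb]

theorem pvDropB_head (xs : List String) :
    pvDropB xs = [] ∨ ∃ y ys, pvDropB xs = y :: ys ∧ ¬ PySem.Str.strip y = "" := by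
  induction xs with
  | nil => exact Or.inl rfl
  | cons x xs ih =>
    by_cases hb : PySem.Str.strip x = ""
    · rw [pvDropB, if_pos hb]; exact ih
    · exact Or.inr ⟨x, xs, by rw [pvDropB, if_neg hb], hb⟩

-- A's whole end-of-section computation equals the structural pvSkipSec
theorem pvA_skip_eq (lines : List String) (h : Nat) :
    lines.drop
      (if pvSkipBlanks lines lines.length (h + 1) < lines.length ∧
          PySem.Str.startswith (PySem.Str.strip (lines.getD (pvSkipBlanks lines lines.length (h + 1)) "")) "```" then
         if pvSkipFence lines lines.length (pvSkipBlanks lines lines.length (h + 1) + 1) < lines.length ∧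
             PySem.Str.startswith (PySem.Str.strip (lines.getD (pvSkipFence lines lines.length (pvSkipBlanks lines lines.length (h + 1) + 1)) "")) "```" then
           pvSkipFence lines lines.length (pvSkipBlanks lines lines.length (h + 1) + 1) + 1
         else pvSkipFence lines lines.length (pvSkipBlanks lines lines.length (h + 1) + 1)
       else pvSkipProse lines lines.length (pvSkipBlanks lines lines.length (h + 1)))
    = pvSkipSec (lines.drop (h + 1)) := by
  have hkey := pvSkipBlanks_drop lines (h + 1)
  set i0 := pvSkipBlanks lines lines.length (h + 1) with hi0
  clear_value i0
  rw [pvSkipSec_dropB, ← hkey]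
  cases hdrop : lines.drop i0 with
  | nil =>
    have hge : lines.length ≤ i0 := by
      by_contra hlt
      rw [List.drop_eq_getElem_cons (by omega : i0 < lines.length)] at hdrop
      cases hdrop
    rw [if_neg (fun hc => absurd hc.1 (by omega))]
    rw [pvSkipProse, if_neg (fun hc => absurd hc.1 (by omega))]
    rw [hdrop]
    rfl
  | cons y ys =>
    have hlt : i0 < lines.length := by
      by_contra hge
      rw [List.drop_eq_nil_of_le (by omega : lines.length ≤ i0)] at hdrop
      cases hdrop
    have hdc := hdrop
    rw [List.drop_eq_getElem_cons hlt] at hdc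
    injection hdc with h1 h2
    have hget : lines.getD i0 "" = y := by
      rw [List.getD_eq_getElem?_getD, List.getElem?_eq_getElem hlt]; exact h1
    have hy : ¬ PySem.Str.strip y = "" := by
      rcases pvDropB_head (lines.drop (h + 1)) with hnil | ⟨z, zs, hzz, hz⟩
      · rw [hnil] at hkey; rw [hkey] at hdrop; cases hdrop
      · rw [hzz] at hkey; rw [hkey] at hdrop
        injection hdrop with e1 e2
        exact e1 ▸ hz
    rw [pvSkipSec, if_neg hy]
    by_cases hf : PySem.Str.startswith (PySem.Str.strip y) "```"
    · rw [if_pos hf, if_pos ⟨hlt, by rw [hget]; exact hf⟩]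
      have hfd := pvSkipFence_drop lines (i0 + 1)
      rw [h2] at hfd
      exact hfd
    · rw [if_neg hf, if_neg (fun hc => hf (by rw [← hget]; exact hc.2))]
      by_cases hh : PySem.Str.startswith (PySem.Str.strip y) "## "
      · rw [if_pos hh]
        rw [pvSkipProse, if_neg (fun hc => hc.2 (by rw [hget]; exact hh))]
        exact hdrop
      · rw [if_neg hh]
        rw [pvSkipProse_drop lines i0, hdrop, pvProseSec, if_neg hh]

-- B's fold, characterised state by state
theorem pvFold_after (tb : List String) (out xs : List String) :
    xs.foldl (pvStep tb) (out, .after) = (out ++ xs, .after) := by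
  induction xs generalizing out with
  | nil => simp
  | cons x xs ih =>
    rw [List.foldl_cons]
    show List.foldl (pvStep tb) (out ++ [x], .after) xs = _
    rw [ih]
    simp

theorem pvFold_fence (tb : List String) (out xs : List String) :
    xs.foldl (pvStep tb) (out, .fence) = (out ++ pvFenceSec xs, .after) ∨
    xs.foldl (pvStep tb) (out, .fence) = (out ++ pvFenceSec xs, .fence) := by
  induction xs generalizing out with
  | nil => right; simp [pvFenceSec]
  | cons x xs ih =>
    rw [List.foldl_cons]
    simp only [pvStep, pvFenceSec]
    by_cases hf : PySem.Str.startswith (PySem.Str.strip x) "```"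
    · rw [if_pos hf, if_pos hf, pvFold_after]
      left; rfl
    · rw [if_neg hf, if_neg hf]
      exact ih out

theorem pvFold_prose (tb : List String) (out xs : List String) :
    xs.foldl (pvStep tb) (out, .prose) = (out ++ pvProseSec xs, .after) ∨
    xs.foldl (pvStep tb) (out, .prose) = (out ++ pvProseSec xs, .prose) := by
  induction xs generalizing out with
  | nil => right; simp [pvProseSec]
  | cons x xs ih =>
    rw [List.foldl_cons]
    simp only [pvStep, pvProseSec]
    by_cases hh : PySem.Str.startswith (PySem.Str.strip x) "## "
    · rw [if_pos hh, if_pos hh, pvFold_after]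
      left; simp
    · rw [if_neg hh, if_neg hh]
      exact ih out

theorem pvFold_blanks (tb : List String) (out xs : List String) :
    (xs.foldl (pvStep tb) (out, .blanks)).1 = out ++ pvSkipSec xs ∧
    (xs.foldl (pvStep tb) (out, .blanks)).2 ≠ PvState.before := by
  induction xs generalizing out with
  | nil => simp [pvSkipSec]
  | cons x xs ih =>
    rw [List.foldl_cons]
    simp only [pvStep, pvSkipSec]
    by_cases hb : PySem.Str.strip x = ""
    · rw [if_pos hb, if_pos hb]
      exact ih out
    · rw [if_neg hb, if_neg hb]
      by_cases hf : PySem.Str.startswith (PySem.Str.strip x) "```"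
      · rw [if_pos hf, if_pos hf]
        rcases pvFold_fence tb out xs with hc | hc <;> rw [hc] <;> exact ⟨rfl, by simp⟩
      · rw [if_neg hf, if_neg hf]
        by_cases hh : PySem.Str.startswith (PySem.Str.strip x) "## "
        · rw [if_pos hh, if_pos hh, pvFold_after]
          exact ⟨by simp, by simp⟩
        · rw [if_neg hh, if_neg hh]
          rcases pvFold_prose tb out xs with hc | hc <;> rw [hc] <;> exact ⟨rfl, by simp⟩

theorem pvFold_before_none (tb : List String) (out xs : List String)
    (hn : pvFindHeading xs = none) :
    xs.foldl (pvStep tb) (out, .before) = (out ++ xs, .before) := by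
  induction xs generalizing out with
  | nil => simp
  | cons x xs ih =>
    rw [pvFindHeading] at hn
    by_cases hp : pvHeadTest x = true
    · rw [if_pos hp] at hn; cases hn
    · rw [if_neg hp] at hn
      have hxs : pvFindHeading xs = none := by
        cases hxs : pvFindHeading xs with
        | none => rfl
        | some k => rw [hxs] at hn; cases hn
      rw [List.foldl_cons]
      simp only [pvStep]
      rw [if_neg (by simpa only [pvHeadTest] using hp)]
      rw [ih (out ++ [x]) hxs]
      simp

theorem pvFold_before_some (tb : List String) (out xs : List String) (h : Nat)
    (hs : pvFindHeading xs = some h) :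
    (xs.foldl (pvStep tb) (out, .before)).1
      = out ++ xs.take (h + 1) ++ tb ++ pvSkipSec (xs.drop (h + 1)) ∧
    (xs.foldl (pvStep tb) (out, .before)).2 ≠ PvState.before := by
  induction xs generalizing out h with
  | nil => cases hs
  | cons x xs ih =>
    rw [pvFindHeading] at hs
    by_cases hp : pvHeadTest x = true
    · rw [if_pos hp] at hs
      injection hs with hs0
      subst hs0
      rw [List.foldl_cons]
      simp only [pvStep]
      rw [if_pos (by simpa only [pvHeadTest] using hp)]
      have hbl := pvFold_blanks tb (out ++ [x] ++ tb) xs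
      refine ⟨?_, hbl.2⟩
      rw [hbl.1]
      simp [List.append_assoc]
    · rw [if_neg hp] at hs
      cases hxs : pvFindHeading xs with
      | none => rw [hxs] at hs; cases hs
      | some h' =>
        rw [hxs] at hs
        injection hs with hs1
        subst hs1
        rw [List.foldl_cons]
        simp only [pvStep]
        rw [if_neg (by simpa only [pvHeadTest] using hp)]
        have := ih (out ++ [x]) h' hxs
        refine ⟨?_, this.2⟩
        rw [this.1]
        simp [List.append_assoc]

theorem pvFindHeading_lt (xs : List String) (h : Nat) (hs : pvFindHeading xs = some h) :
    h < xs.length := by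
  induction xs generalizing h with
  | nil => cases hs
  | cons x xs ih =>
    rw [pvFindHeading] at hs
    by_cases hp : pvHeadTest x = true
    · rw [if_pos hp] at hs
      injection hs with hs0
      simp [← hs0]
    · rw [if_neg hp] at hs
      cases hxs : pvFindHeading xs with
      | none => rw [hxs] at hs; cases hs
      | some h' =>
        rw [hxs] at hs
        injection hs with hs1
        subst hs1
        have := ih h' hxs
        simp only [List.length_cons]
        omega

-- ===== VERDICT (by name: the statement is the Claim_ definition above) =====
theorem replace_timeline_section_spec : Claim_equal_replace_timeline_section := by
  intro md vb _
  show replace_timeline_section md vb = replace_timeline_section_alt md vb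
  cases hfind : pvFindHeading (PySem.Str.splitlines md) with
  | none =>
    have hfold := pvFold_before_none ("" :: "```text" :: PySem.Str.splitlines vb ++ ["```"])
      [] (PySem.Str.splitlines md) hfind
    simp only [replace_timeline_section, replace_timeline_section_alt, hfind, hfold]
    simp
  | some h =>
    have hfold := pvFold_before_some ("" :: "```text" :: PySem.Str.splitlines vb ++ ["```"])
      [] (PySem.Str.splitlines md) h hfind
    have hlt := pvFindHeading_lt _ h hfind
    have hskip := pvA_skip_eq (PySem.Str.splitlines md) h
    simp only [replace_timeline_section, replace_timeline_section_alt, hfind]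
    rw [if_neg hfold.2]
    have hget : (PySem.Str.splitlines md).getD h "" = (PySem.Str.splitlines md)[h] := by
      rw [List.getD_eq_getElem?_getD, List.getElem?_eq_getElem hlt]; rfl
    have htake : (PySem.Str.splitlines md).take (h + 1)
        = (PySem.Str.splitlines md).take h ++ [(PySem.Str.splitlines md)[h]] := by
      rw [List.take_add_one, List.getElem?_eq_getElem hlt]; rfl
    congr 2
    rw [hfold.1, hskip, hget]
    simp [List.append_assoc]
    rw [htake]
    simp only [List.append_assoc, List.singleton_append]
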